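-- pv_equiv track=rewrite | github.com/Seebee87/CS325_S21 | Week 3/game.py | game_bottomup
-- ===== SOURCE A (Python) =====
-- def game_bottomup(N):
--     if N == 1 or N == 3 or N < 1:
--         return False
--     if N == 2:
--         return True
--     else:
--         count_array = [0]*(N)
--         count_array[1] = 1
--         for i in range(4, len(count_array)+1):
--             for j in range(2, int(i)):
--                 if count_array[i-1] == 0:
--                     if (i) % j == 0:
--                         if count_array[j-1] == 1:
--                             count_array[i-1] = 1
--         return bool(count_array[N-1])
-- ===== SOURCE B (Python) =====
-- def game_bottomup(N):
--     # Closed form: the DP marks exactly the even positions >= 2 as winning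
--     # (an odd position's proper divisors are all odd, hence losing by induction;
--     # an even position >= 4 always has the winning divisor 2).
--     return N >= 2 and N % 2 == 0
-- ===== Notes on version B (the rewrite author's own statement) =====
-- stated objective: faster
-- what changed: Replaced the quadratic divisor DP table by the closed-form parity test (even and at least two), proved equal by a loop invariant on the table.
import Mathlib
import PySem

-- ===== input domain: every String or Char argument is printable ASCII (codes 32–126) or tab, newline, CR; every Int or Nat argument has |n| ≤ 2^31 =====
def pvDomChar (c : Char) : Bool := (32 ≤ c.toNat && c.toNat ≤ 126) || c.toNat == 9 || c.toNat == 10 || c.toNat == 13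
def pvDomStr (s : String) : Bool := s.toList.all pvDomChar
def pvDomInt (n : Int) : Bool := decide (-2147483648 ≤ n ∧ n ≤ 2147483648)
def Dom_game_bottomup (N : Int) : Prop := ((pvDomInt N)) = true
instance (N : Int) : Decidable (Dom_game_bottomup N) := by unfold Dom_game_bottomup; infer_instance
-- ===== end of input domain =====

-- B replaces A's O(N^2) divisor DP table by the closed-form parity test (N ≥ 2 and N even).

-- ===== PORT A =====
-- Literal transliteration of A's DP.  In the else branch N ≥ 4, so the loop
-- bounds and all indices (i-1, j-1, N-1) are nonnegative and in range; the
-- ranges are therefore taken over Nat (exact for these positive Python ranges).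
def game_bottomup (N : Int) : Bool :=
  if N = 1 ∨ N = 3 ∨ N < 1 then false
  else if N = 2 then true
  else
    let n : Nat := N.toNat
    let arr0 : List Int := (List.replicate n 0).set 1 1
    let arr : List Int :=
      (List.range' 4 (n + 1 - 4)).foldl (fun arr i =>          -- for i in range(4, len+1)
        (List.range' 2 (i - 2)).foldl (fun a j =>              -- for j in range(2, i)
          if a.getD (i - 1) 0 = 0 then
            if i % j = 0 then
              if a.getD (j - 1) 0 = 1 then a.set (i - 1) 1 else a
            else a
          else a) arr) arr0
    decide (arr.getD (n - 1) 0 ≠ 0)                             -- bool(count_array[N-1])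

-- ===== PORT B =====
def game_bottomup_alt (N : Int) : Bool :=
  decide (N ≥ 2) && decide (N % 2 = 0)

-- ===== PRECONDITION & SPEC =====
def Spec_game_bottomup (N : Int) (out : Bool) : Prop := out = game_bottomup_alt N
instance (N : Int) (out : Bool) : Decidable (Spec_game_bottomup N out) := by unfold Spec_game_bottomup; infer_instance

-- ===== CLAIM (what is proved, stated in full; the proofs are below) =====
def Claim_equal_game_bottomup : Prop := ∀ (N : Int), Dom_game_bottomup N → Spec_game_bottomup N (game_bottomup N)

-- ===== LEMMAS AND PROOFS =====

-- the table A's loop builds: entry k is 1 exactly for the odd indices below b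
def pvPat (b n : Nat) : List Int :=
  (List.range n).map (fun k => if k % 2 = 1 ∧ k < b then 1 else 0)

theorem pvPat_getD (b n k : Nat) (hk : k < n) :
    (pvPat b n).getD k 0 = (if k % 2 = 1 ∧ k < b then 1 else 0) := by
  simp [pvPat, List.getD, hk]

theorem pvPat_init (n : Nat) (_hn : 2 ≤ n) :
    (List.replicate n (0 : Int)).set 1 1 = pvPat 3 n := by
  apply List.ext_getElem
  · simp [pvPat]
  · intro k h1 h2
    simp only [pvPat, List.getElem_map, List.getElem_range]
    rcases Nat.lt_or_ge k 2 with h | h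
    · interval_cases k <;> simp [List.getElem_replicate]
    · have : ¬ (k % 2 = 1 ∧ k < 3) := by omega
      simp only [List.getElem_set, List.getElem_replicate, this, if_false]
      have : ¬ ((1 : Nat) = k) := by omega
      simp [this]

-- a fold whose step is the identity at its start value
theorem pvFoldl_id {α β : Type} (f : α → β → α) (l : List β) (a : α)
    (h : ∀ b ∈ l, f a b = a) : l.foldl f a = a := by
  induction l with
  | nil => rfl
  | cons x xs ih =>
      simp only [List.foldl_cons, h x (by simp)]
      exact ih (fun b hb => h b (by simp [hb]))

-- inner loop, odd i: no divisor j in [2, i) has an odd j-1, so nothing fires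
theorem pvInner_odd (i n : Nat) (hi : 4 ≤ i) (hin : i ≤ n) (hodd : i % 2 = 1) :
    (List.range' 2 (i - 2)).foldl (fun a j =>
      if a.getD (i - 1) 0 = 0 then
        if i % j = 0 then
          if a.getD (j - 1) 0 = 1 then a.set (i - 1) 1 else a
        else a
      else a) (pvPat (i - 1) n) = pvPat (i - 1) n := by
  apply pvFoldl_id
  intro j hj
  have hj2 : 2 ≤ j ∧ j < i := by
    have := List.mem_range'_1.mp hj; omega
  split_ifs with hA hB hC
  · -- j divides odd i, so j is odd, so j-1 is even and its entry is 0: hC is absurd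
    exfalso
    have hjodd : j % 2 = 1 := by
      by_cases he : j % 2 = 0
      · exfalso
        have h2j : 2 ∣ j := Nat.dvd_of_mod_eq_zero he
        have hji : j ∣ i := Nat.dvd_of_mod_eq_zero hB
        have : 2 ∣ i := h2j.trans hji
        omega
      · omega
    have hz : (pvPat (i - 1) n).getD (j - 1) 0 = 0 := by
      rw [pvPat_getD _ _ _ (by omega)]
      have : ¬ ((j - 1) % 2 = 1 ∧ j - 1 < i - 1) := by omega
      simp [this]
    omega
  all_goals rfl

-- inner loop, even i: j = 2 fires and sets entry i-1, the rest is identity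
theorem pvInner_even (i n : Nat) (hi : 4 ≤ i) (hin : i ≤ n) (heven : i % 2 = 0) :
    (List.range' 2 (i - 2)).foldl (fun a j =>
      if a.getD (i - 1) 0 = 0 then
        if i % j = 0 then
          if a.getD (j - 1) 0 = 1 then a.set (i - 1) 1 else a
        else a
      else a) (pvPat (i - 1) n) = pvPat i n := by
  have hrange : List.range' 2 (i - 2) = 2 :: List.range' 3 (i - 3) := by
    have : i - 2 = (i - 3) + 1 := by omega
    rw [this, List.range'_succ]
  have hset : (pvPat (i - 1) n).set (i - 1) 1 = pvPat i n := by
    apply List.ext_getElem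
    · simp [pvPat]
    · intro k h1 h2
      simp only [List.getElem_set] at h1 ⊢
      simp only [pvPat, List.getElem_map, List.getElem_range]
      by_cases hk : i - 1 = k
      · have : k % 2 = 1 ∧ k < i := by omega
        simp [hk, this]
      · have heq : (k % 2 = 1 ∧ k < i - 1) ↔ (k % 2 = 1 ∧ k < i) := by omega
        simp [hk, heq]
  rw [hrange]
  simp only [List.foldl_cons]
  have hcur : (pvPat (i - 1) n).getD (i - 1) 0 = 0 := by
    rw [pvPat_getD _ _ _ (by omega)]
    have h : ¬ ((i - 1) % 2 = 1 ∧ i - 1 < i - 1) := by omega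
    rw [if_neg h]
  have h1 : (pvPat (i - 1) n).getD (2 - 1) 0 = 1 := by
    rw [pvPat_getD _ _ _ (by omega)]
    have : (2 - 1) % 2 = 1 ∧ 2 - 1 < i - 1 := by omega
    simp [this]
  have hdvd : i % 2 = 0 := heven
  rw [if_pos hcur, if_pos hdvd, if_pos h1, hset]
  apply pvFoldl_id
  intro j hj
  have ht : (pvPat i n).getD (i - 1) 0 = 1 := by
    rw [pvPat_getD _ _ _ (by omega)]
    have : (i - 1) % 2 = 1 ∧ i - 1 < i := by omega
    simp [this]
  split_ifs with hA hB hC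
  · exfalso; omega
  all_goals rfl

-- outer loop invariant
theorem pvOuter (c : Nat) : ∀ (i n : Nat), 4 ≤ i → i - 1 + c ≤ n →
    (List.range' i c).foldl (fun arr i =>
      (List.range' 2 (i - 2)).foldl (fun a j =>
        if a.getD (i - 1) 0 = 0 then
          if i % j = 0 then
            if a.getD (j - 1) 0 = 1 then a.set (i - 1) 1 else a
          else a
        else a) arr) (pvPat (i - 1) n) = pvPat (i - 1 + c) n := by
  induction c with
  | zero => intro i n _ _; simp
  | succ c ih =>
      intro i n hi hn
      rw [List.range'_succ, List.foldl_cons]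
      have hstep : (List.range' 2 (i - 2)).foldl (fun a j =>
          if a.getD (i - 1) 0 = 0 then
            if i % j = 0 then
              if a.getD (j - 1) 0 = 1 then a.set (i - 1) 1 else a
            else a
          else a) (pvPat (i - 1) n) = pvPat i n := by
        by_cases hp : i % 2 = 0
        · exact pvInner_even i n hi (by omega) hp
        · rw [pvInner_odd i n hi (by omega) (by omega)]
          apply List.ext_getElem
          · simp [pvPat]
          · intro k h1 h2
            simp only [pvPat, List.getElem_map, List.getElem_range]
            have : (k % 2 = 1 ∧ k < i - 1) ↔ (k % 2 = 1 ∧ k < i) := by omega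
            simp [this]
      rw [hstep]
      have : pvPat i n = pvPat (i + 1 - 1) n := by norm_num
      rw [this, ih (i + 1) n (by omega) (by omega)]
      congr 1
      omega

-- ===== VERDICT (by name: the statement is the Claim_ definition above) =====
theorem game_bottomup_spec : Claim_equal_game_bottomup := by
  intro N _
  unfold Spec_game_bottomup game_bottomup game_bottomup_alt
  by_cases hbase : N = 1 ∨ N = 3 ∨ N < 1
  · rw [if_pos hbase]
    rcases hbase with h | h | h
    · subst h; rfl
    · subst h; rfl
    · have : ¬ (N ≥ 2) := by omega
      simp [this]
  · rw [if_neg hbase]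
    rw [not_or, not_or] at hbase
    by_cases h2 : N = 2
    · subst h2; decide
    · rw [if_neg h2]
      have hN4 : 4 ≤ N := by omega
      have hn4 : 4 ≤ N.toNat := by omega
      simp only []
      rw [pvPat_init N.toNat (by omega)]
      have h3 : (3 : Nat) = 4 - 1 := rfl
      rw [h3, pvOuter (N.toNat + 1 - 4) 4 N.toNat (by omega) (by omega)]
      have hfin : 4 - 1 + (N.toNat + 1 - 4) = N.toNat := by omega
      rw [hfin, pvPat_getD N.toNat N.toNat (N.toNat - 1) (by omega)]
      by_cases hp : N.toNat % 2 = 0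
      · have h1 : (N.toNat - 1) % 2 = 1 ∧ N.toNat - 1 < N.toNat := by omega
        have hge : N ≥ 2 := by omega
        have hm : N % 2 = 0 := by omega
        simp [h1, hge, hm]
      · have h1 : ¬ ((N.toNat - 1) % 2 = 1 ∧ N.toNat - 1 < N.toNat) := by omega
        have hm : ¬ (N % 2 = 0) := by omega
        rw [if_neg h1]
        simp [hm]
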